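-- pv_equiv track=rewrite | github.com/yaronlev9/Intro2cs-course | ex2/wave_editor.py | merge_equal_rates
-- ===== SOURCE A (Python) =====
-- def average(x, y, z=0, divider=2):
--     """returns the average value of up to 3 numbers"""
--     return int((x+y+z)/divider)
--
-- def merge_equal_rates(data1, data2):
--     '''this function recieves 2 datas from 2 files
--      with equal rate and returns the merge'''
--     new_data=[]
--     if len(data1) == len(data2):
--         for i in range(len(data1)):
--             sample0 = average(data1[i][0],data2[i][0])
--             sample1 = average(data1[i][1],data2[i][1])
--             new_data.append([sample0, sample1])
--         return new_data
--     elif len(data1) < len(data2):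
--         for i in range(len(data1)):
--             sample0 =average(data1[i][0],data2[i][0])
--             sample1 =average(data1[i][1],data2[i][1])
--             new_data.append([sample0, sample1])
--         new_data += data2[len(data1):]
--         return new_data
--     else:
--         for i in range(len(data2)):
--             sample0 =average(data1[i][0],data2[i][0])
--             sample1 =average(data1[i][1],data2[i][1])
--             new_data.append([sample0, sample1])
--         new_data += data1[len(data2):]
--         return new_data
-- ===== SOURCE B (Python) =====
-- def average(x, y, z=0, divider=2):
--     """returns the average value of up to 3 numbers"""
--     return int((x+y+z)/divider)
--
-- def merge_equal_rates(data1, data2):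
--     '''single sentinel-driven pass over both lists (zip_longest style):
--     no length comparison, no separate tail slice'''
--     it1, it2 = iter(data1), iter(data2)
--     out = []
--     while True:
--         a = next(it1, None)
--         b = next(it2, None)
--         if a is None and b is None:
--             return out
--         if a is None:
--             out.append(b)
--         elif b is None:
--             out.append(a)
--         else:
--             out.append([average(a[0], b[0]), average(a[1], b[1])])
-- ===== Notes on version B (the rewrite author's own statement) =====
-- stated objective: simpler
-- what changed: Replaces the three length-keyed branches (equal/shorter/longer, each with its own index loop and tail slice) by one sentinel-driven pass that walks both lists together and appends the leftover tail element-by-element.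
import Mathlib
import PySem

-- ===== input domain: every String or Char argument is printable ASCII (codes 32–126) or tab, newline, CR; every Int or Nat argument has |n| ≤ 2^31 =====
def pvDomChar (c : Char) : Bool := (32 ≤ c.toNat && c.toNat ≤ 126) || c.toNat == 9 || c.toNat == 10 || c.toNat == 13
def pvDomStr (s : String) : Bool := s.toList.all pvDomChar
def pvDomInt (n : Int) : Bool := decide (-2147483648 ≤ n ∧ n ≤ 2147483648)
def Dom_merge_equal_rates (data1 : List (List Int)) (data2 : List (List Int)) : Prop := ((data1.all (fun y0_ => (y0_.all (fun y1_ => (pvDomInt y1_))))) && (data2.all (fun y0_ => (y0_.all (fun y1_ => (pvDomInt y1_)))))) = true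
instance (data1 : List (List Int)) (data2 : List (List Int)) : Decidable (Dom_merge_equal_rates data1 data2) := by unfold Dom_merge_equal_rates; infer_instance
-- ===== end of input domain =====

-- B replaces A's three length-keyed branches by one sentinel-driven pass over both lists (simpler).

-- ===== PORT A =====
-- average(x, y): int((x+y)/2). Exact on Dom: |x+y| ≤ 2^33 is exact in a double, /2 is exact,
-- and int() truncates toward zero, which is Int.tdiv.
def pyAverage (x y : Int) : Int := Int.tdiv (x + y) 2

def merge_equal_rates (data1 : List (List Int)) (data2 : List (List Int)) : List (List Int) :=
  if data1.length = data2.length then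
    (PySem.List.pyRange 0 data1.length 1).foldl (fun acc i =>
      acc ++ [[pyAverage (PySem.List.pyGetD (PySem.List.pyGetD data1 i []) 0 0)
                          (PySem.List.pyGetD (PySem.List.pyGetD data2 i []) 0 0),
               pyAverage (PySem.List.pyGetD (PySem.List.pyGetD data1 i []) 1 0)
                          (PySem.List.pyGetD (PySem.List.pyGetD data2 i []) 1 0)]]) []
  else if data1.length < data2.length then
    ((PySem.List.pyRange 0 data1.length 1).foldl (fun acc i =>
      acc ++ [[pyAverage (PySem.List.pyGetD (PySem.List.pyGetD data1 i []) 0 0)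
                          (PySem.List.pyGetD (PySem.List.pyGetD data2 i []) 0 0),
               pyAverage (PySem.List.pyGetD (PySem.List.pyGetD data1 i []) 1 0)
                          (PySem.List.pyGetD (PySem.List.pyGetD data2 i []) 1 0)]]) [])
      ++ PySem.List.slice data2 (some (data1.length : Int)) none
  else
    ((PySem.List.pyRange 0 data2.length 1).foldl (fun acc i =>
      acc ++ [[pyAverage (PySem.List.pyGetD (PySem.List.pyGetD data1 i []) 0 0)
                          (PySem.List.pyGetD (PySem.List.pyGetD data2 i []) 0 0),
               pyAverage (PySem.List.pyGetD (PySem.List.pyGetD data1 i []) 1 0)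
                          (PySem.List.pyGetD (PySem.List.pyGetD data2 i []) 1 0)]]) [])
      ++ PySem.List.slice data1 (some (data2.length : Int)) none

-- ===== PORT B =====
-- one pass: take one element from each side; if one side is exhausted, pass the
-- other side's element through; otherwise average the pair.
def merge_equal_rates_alt (data1 : List (List Int)) (data2 : List (List Int)) : List (List Int) :=
  match data1, data2 with
  | [], ys => ys
  | xs, [] => xs
  | a :: xs, b :: ys =>
      [pyAverage (PySem.List.pyGetD a 0 0) (PySem.List.pyGetD b 0 0),
       pyAverage (PySem.List.pyGetD a 1 0) (PySem.List.pyGetD b 1 0)]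
        :: merge_equal_rates_alt xs ys

-- ===== PRECONDITION & SPEC =====
-- Pre_ excludes exactly the inputs on which Python A raises IndexError: a sample row with
-- fewer than 2 entries inside the overlapping prefix of the two lists.
def Pre_merge_equal_rates (data1 : List (List Int)) (data2 : List (List Int)) : Prop :=
  ∀ p ∈ data1.zip data2, 2 ≤ p.1.length ∧ 2 ≤ p.2.length
instance (data1 : List (List Int)) (data2 : List (List Int)) : Decidable (Pre_merge_equal_rates data1 data2) := by unfold Pre_merge_equal_rates; infer_instance

def pvWitness_merge_equal_rates : List (List Int) × List (List Int) :=
  ([[1, 2]], [[2, 5], [9, 9]])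

def Spec_merge_equal_rates (data1 : List (List Int)) (data2 : List (List Int)) (out : List (List Int)) : Prop := out = merge_equal_rates_alt data1 data2
instance (data1 : List (List Int)) (data2 : List (List Int)) (out : List (List Int)) : Decidable (Spec_merge_equal_rates data1 data2 out) := by unfold Spec_merge_equal_rates; infer_instance

-- ===== CLAIM (what is proved, stated in full; the proofs are below) =====
def Claim_equal_merge_equal_rates : Prop := ∀ (data1 : List (List Int)) (data2 : List (List Int)), Dom_merge_equal_rates data1 data2 → Pre_merge_equal_rates data1 data2 → Spec_merge_equal_rates data1 data2 (merge_equal_rates data1 data2)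

-- ===== LEMMAS AND PROOFS =====

-- the per-pair output of both programs
def pvPair (a b : List Int) : List Int :=
  [pyAverage (PySem.List.pyGetD a 0 0) (PySem.List.pyGetD b 0 0),
   pyAverage (PySem.List.pyGetD a 1 0) (PySem.List.pyGetD b 1 0)]

-- the index loop over the overlap equals a map over the zip (n = shorter length)
theorem pvLoop_eq_zipMap (d1 d2 : List (List Int)) (n : Nat)
    (h1 : n ≤ d1.length) (h2 : n ≤ d2.length) (hmin : n = min d1.length d2.length) :
    (PySem.List.pyRange 0 (n : Int) 1).map
      (fun i => pvPair (PySem.List.pyGetD d1 i []) (PySem.List.pyGetD d2 i []))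
      = (d1.zip d2).map (fun p => pvPair p.1 p.2) := by
  apply List.ext_getElem
  · simp [PySem.List.length_pyRange_one, hmin]
    omega
  · intro k hk hk'
    simp only [PySem.List.length_pyRange_one, List.length_map] at hk
    have hkn : k < n := by omega
    have e1 : (PySem.List.pyRange 0 (n : Int) 1)[k]'(by
        simp [PySem.List.length_pyRange_one]; omega) = (0 : Int) + k :=
      PySem.List.getElem_pyRange_one _ _ _ _
    simp only [List.getElem_map]
    rw [e1]
    have g1 : PySem.List.pyGetD d1 ((0 : Int) + (k : Int)) [] = d1[k]'(by omega) := by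
      rw [zero_add, PySem.List.pyGetD_natCast]
      exact List.getD_eq_getElem d1 [] (by omega)
    have g2 : PySem.List.pyGetD d2 ((0 : Int) + (k : Int)) [] = d2[k]'(by omega) := by
      rw [zero_add, PySem.List.pyGetD_natCast]
      exact List.getD_eq_getElem d2 [] (by omega)
    rw [g1, g2]
    simp [List.getElem_zip]

theorem pvAlt_eq (d1 d2 : List (List Int)) :
    merge_equal_rates_alt d1 d2
      = (d1.zip d2).map (fun p => pvPair p.1 p.2)
        ++ d1.drop d2.length ++ d2.drop d1.length := by
  induction d1 generalizing d2 with
  | nil => cases d2 <;> simp [merge_equal_rates_alt]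
  | cons a xs ih =>
    cases d2 with
    | nil => simp [merge_equal_rates_alt]
    | cons b ys => simp [merge_equal_rates_alt, ih, pvPair]

theorem pvA_eq (d1 d2 : List (List Int)) :
    merge_equal_rates d1 d2
      = (d1.zip d2).map (fun p => pvPair p.1 p.2)
        ++ d1.drop d2.length ++ d2.drop d1.length := by
  unfold merge_equal_rates
  split_ifs with h1 h2
  · rw [PySem.List.foldl_append_singleton_eq_map, List.nil_append]
    rw [show ((fun i => [pyAverage (PySem.List.pyGetD (PySem.List.pyGetD d1 i []) 0 0)
        (PySem.List.pyGetD (PySem.List.pyGetD d2 i []) 0 0),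
        pyAverage (PySem.List.pyGetD (PySem.List.pyGetD d1 i []) 1 0)
        (PySem.List.pyGetD (PySem.List.pyGetD d2 i []) 1 0)])
        = fun i => pvPair (PySem.List.pyGetD d1 i []) (PySem.List.pyGetD d2 i [])) from rfl]
    rw [pvLoop_eq_zipMap d1 d2 d1.length le_rfl (le_of_eq h1) (by omega)]
    simp [h1, List.drop_eq_nil_of_le]
  · rw [PySem.List.foldl_append_singleton_eq_map, List.nil_append]
    rw [show ((fun i => [pyAverage (PySem.List.pyGetD (PySem.List.pyGetD d1 i []) 0 0)
        (PySem.List.pyGetD (PySem.List.pyGetD d2 i []) 0 0),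
        pyAverage (PySem.List.pyGetD (PySem.List.pyGetD d1 i []) 1 0)
        (PySem.List.pyGetD (PySem.List.pyGetD d2 i []) 1 0)])
        = fun i => pvPair (PySem.List.pyGetD d1 i []) (PySem.List.pyGetD d2 i [])) from rfl]
    rw [pvLoop_eq_zipMap d1 d2 d1.length le_rfl (le_of_lt h2) (by omega)]
    rw [PySem.List.slice_from_natCast]
    rw [List.drop_eq_nil_of_le (le_of_lt h2)]
    simp
  · have h3 : d2.length ≤ d1.length := by omega
    rw [PySem.List.foldl_append_singleton_eq_map, List.nil_append]
    rw [show ((fun i => [pyAverage (PySem.List.pyGetD (PySem.List.pyGetD d1 i []) 0 0)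
        (PySem.List.pyGetD (PySem.List.pyGetD d2 i []) 0 0),
        pyAverage (PySem.List.pyGetD (PySem.List.pyGetD d1 i []) 1 0)
        (PySem.List.pyGetD (PySem.List.pyGetD d2 i []) 1 0)])
        = fun i => pvPair (PySem.List.pyGetD d1 i []) (PySem.List.pyGetD d2 i [])) from rfl]
    rw [pvLoop_eq_zipMap d1 d2 d2.length h3 le_rfl (by omega)]
    rw [PySem.List.slice_from_natCast]
    rw [List.drop_eq_nil_of_le h3]
    simp

-- ===== VERDICT (by name: the statement is the Claim_ definition above) =====
theorem merge_equal_rates_spec : Claim_equal_merge_equal_rates := by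
  intro d1 d2 _ _
  unfold Spec_merge_equal_rates
  rw [pvA_eq, pvAlt_eq]
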